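-- pv_equiv track=rewrite | github.com/vcu-bfekade/spiral2 | spiral2/homework.py | spiralize
-- ===== SOURCE A (Python) =====
-- def spiralize(size, n=1):
--     """ Your code goes somewhere in here"""
--     n = 1
--     adder = 0
--     rome = 2
--     totl = 0
--
--     while n <= size ** 2:
--         totl += 1
--         n += rome
--         adder += 1
--         if adder == n:
--             rome += 2
--             adder = 0
--     return totl
--
--     return_value = n
--     return return_value
-- ===== SOURCE B (Python) =====
-- def spiralize(size, n=1):
--     # Closed form: A's loop counts the odd numbers 1,3,5,... up to size**2
--     # (its rome/adder branch never fires), i.e. (size**2 - 1)//2 + 1.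
--     return (size * size - 1) // 2 + 1
-- ===== Notes on version B (the rewrite author's own statement) =====
-- stated objective: faster
-- what changed: Replaced the step-by-2 counting loop (whose rome/adder branch never fires) by the closed form (size*size - 1)//2 + 1.
import Mathlib
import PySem

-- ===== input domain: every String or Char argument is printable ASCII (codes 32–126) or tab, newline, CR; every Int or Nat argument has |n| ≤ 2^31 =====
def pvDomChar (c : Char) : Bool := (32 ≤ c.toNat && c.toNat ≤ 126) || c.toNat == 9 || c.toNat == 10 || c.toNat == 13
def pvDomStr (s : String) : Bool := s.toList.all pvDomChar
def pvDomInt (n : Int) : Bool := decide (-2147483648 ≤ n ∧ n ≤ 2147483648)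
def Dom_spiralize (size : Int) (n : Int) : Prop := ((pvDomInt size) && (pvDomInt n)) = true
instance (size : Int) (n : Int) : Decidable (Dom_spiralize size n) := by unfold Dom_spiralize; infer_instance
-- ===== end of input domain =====

-- B replaces A's step-by-2 counting loop with the closed form (size*size - 1)//2 + 1 (objective: faster).

-- ===== PORT A =====
-- A's while loop, state (n, adder, rome, totl); fuel is only a totality guard
-- (each pass consumes 1 fuel; size^2 + 1 units are always enough, proved below).
def spiralizeLoop (size : Int) (fuel : Nat) (n : Int) (adder : Int) (rome : Int) (totl : Int) : Int :=
  match fuel with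
  | 0 => totl
  | fuel + 1 =>
    if n ≤ size ^ 2 then
      -- totl += 1; n += rome; adder += 1; if adder == n: rome += 2; adder = 0
      if adder + 1 = n + rome then
        spiralizeLoop size fuel (n + rome) 0 (rome + 2) (totl + 1)
      else
        spiralizeLoop size fuel (n + rome) (adder + 1) rome (totl + 1)
    else totl

def spiralize (size : Int) (n : Int) : Int :=
  -- n = 1; adder = 0; rome = 2; totl = 0; while n <= size ** 2: …; return totl
  spiralizeLoop size ((size ^ 2).toNat + 1) 1 0 2 0

-- ===== PORT B =====
def spiralize_alt (size : Int) (n : Int) : Int :=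
  PySem.Int.floordiv (size * size - 1) 2 + 1

-- ===== PRECONDITION & SPEC =====
def Spec_spiralize (size : Int) (n : Int) (out : Int) : Prop := out = spiralize_alt size n
instance (size : Int) (n : Int) (out : Int) : Decidable (Spec_spiralize size n out) := by unfold Spec_spiralize; infer_instance

-- ===== CLAIM (what is proved, stated in full; the proofs are below) =====
def Claim_equal_spiralize : Prop := ∀ (size : Int) (n : Int), Dom_spiralize size n → Spec_spiralize size n (spiralize size n)

-- ===== LEMMAS AND PROOFS =====

-- With the invariant adder < n, the rome/adder branch never fires: the loop just
-- counts n = n, n+2, n+4, … while n ≤ size² (given enough fuel).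
theorem spiralizeLoop_eq (size : Int) :
    ∀ (fuel : Nat) (n adder totl : Int), adder < n → size ^ 2 - n < 2 * (fuel : Int) →
      spiralizeLoop size fuel n adder 2 totl =
        (if n ≤ size ^ 2 then totl + ((size ^ 2 - n) / 2 + 1) else totl) := by
  intro fuel
  induction fuel with
  | zero =>
    intro n adder totl hlt hfuel
    have : ¬ n ≤ size ^ 2 := by push_cast at hfuel; omega
    simp [spiralizeLoop, this]
  | succ fuel ih =>
    intro n adder totl hlt hfuel
    rw [spiralizeLoop]
    by_cases h : n ≤ size ^ 2
    · have hne : ¬ (adder + 1 = n + 2) := by omega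
      rw [if_pos h, if_neg hne,
        ih (n + 2) (adder + 1) (totl + 1) (by omega) (by push_cast at hfuel ⊢; omega)]
      by_cases h2 : n + 2 ≤ size ^ 2
      · rw [if_pos h2, if_pos h]; omega
      · rw [if_neg h2, if_pos h]; omega
    · rw [if_neg h, if_neg h]

theorem spiralize_eq_closed (size : Int) (n : Int) :
    spiralize size n = (size * size - 1) / 2 + 1 := by
  unfold spiralize
  have hnn : (0 : Int) ≤ size ^ 2 := sq_nonneg size
  rw [spiralizeLoop_eq size _ 1 0 0 (by norm_num) (by push_cast; omega)]
  have hsq : size ^ 2 = size * size := sq size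
  by_cases h : (1 : Int) ≤ size ^ 2
  · rw [if_pos h]; omega
  · -- then size² = 0 (size = 0), both sides are 0
    have h0 : size * size = 0 := by omega
    rw [if_neg h, h0]
    decide

-- ===== VERDICT (by name: the statement is the Claim_ definition above) =====
theorem spiralize_spec : Claim_equal_spiralize := by
  intro size n _
  unfold Spec_spiralize spiralize_alt
  rw [spiralize_eq_closed, PySem.Int.floordiv_eq_ediv_of_pos (by norm_num)]
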